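-- pv_equiv track=rewrite | github.com/Recordum/Jungle_algorithm | krafton/04.py | solution
-- ===== SOURCE A (Python) =====
-- from collections import defaultdict
--
-- def table_func(diagram):
--     m = len(diagram)
--     d = defaultdict(int)
--
--     begin = 1
--     matched = 0
--
--     while begin + matched < m:
--         if diagram[begin + matched] == diagram[matched]:
--             matched += 1
--             d[begin + matched - 1] = matched
--         elif matched == 0:
--             begin += 1
--         else:
--             begin += matched - d[matched - 1]
--             matched = d[matched - 1]
--     return d
--
-- def KMP(word, diagram):
--     table = table_func(diagram)
--     results = []
--     p = 0
--
--     for idx in range(len(word)):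
--         while p > 0 and word[idx] != diagram[p]:
--             p = table[p - 1]
--
--         if word[idx] == diagram[p]:
--             if p == len(diagram) - 1:
--                 results.append(idx - len(diagram) + 2)
--                 p = table[p]
--             else:
--                 p += 1
--
--     return results
--
-- def solution(S):
--     result = []
--     answer = -2
--     for i in range(1, len(S)):
--         result = KMP(S, S[i - 1] + S[i])
--         if len(result) < 2:
--             answer = max(answer, -1)
--             continue
--         answer = max(answer, result[-1] - result[0])
--     return answer
-- ===== SOURCE B (Python) =====
-- def solution(S):
--     d = {}
--     for i, pr in enumerate(zip(S, S[1:])):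
--         f = d[pr][0] if pr in d else i
--         d[pr] = (f, i)
--     best = -2
--     for f, l in d.values():
--         best = max(best, l - f if l > f else -1)
--     return best
-- ===== Notes on version B (the rewrite author's own statement) =====
-- stated objective: faster
-- what changed: Replaces the per-position KMP search (a full pattern-matching pass over S for every adjacent character pair) with a single pass that records, in one dict keyed by the adjacent pair, the first and last index where each pair occurs, then takes the max span per pair.
import Mathlib
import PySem

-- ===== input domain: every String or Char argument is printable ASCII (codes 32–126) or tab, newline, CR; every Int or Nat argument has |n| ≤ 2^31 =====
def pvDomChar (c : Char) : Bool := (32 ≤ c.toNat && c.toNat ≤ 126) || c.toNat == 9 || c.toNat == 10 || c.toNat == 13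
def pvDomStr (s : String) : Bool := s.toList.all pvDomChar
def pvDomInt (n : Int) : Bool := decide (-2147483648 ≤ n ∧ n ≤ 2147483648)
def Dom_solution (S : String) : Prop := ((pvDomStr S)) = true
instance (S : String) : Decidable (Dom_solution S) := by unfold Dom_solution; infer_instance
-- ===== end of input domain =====

-- B replaces A's per-position KMP search of the whole string with a single pass recording first/last index per adjacent char pair in a dict (objective: faster).

-- ===== PORT A =====
-- while-loop of table_func; the fuel only makes the recursion structural: each iteration either raises begin+matched
-- (bounded by m) or lowers matched (bounded by m) keeping begin+matched, so (m+1)*(m+1) steps are never exhausted.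
def tableLoop (dia : List Char) (m : Int) : Nat → Int → Int → PySem.Dict Int Int → PySem.Dict Int Int
  | 0, _, _, d => d
  | fuel+1, b, matched, d =>
    if b + matched < m then
      -- diagram[begin+matched] == diagram[matched]; both indices are in range on every iteration A reaches
      if PySem.List.pyGet? dia (b + matched) = PySem.List.pyGet? dia matched then
        tableLoop dia m fuel b (matched + 1) (d.insert (b + matched) (matched + 1))
      else if matched = 0 then
        tableLoop dia m fuel (b + 1) matched d
      else
        tableLoop dia m fuel (b + (matched - d.getD (matched - 1) 0)) (d.getD (matched - 1) 0) d
    else d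

def table_func (dia : List Char) : PySem.Dict Int Int :=
  tableLoop dia (dia.length : Int) ((dia.length + 1) * (dia.length + 1)) 1 0 PySem.Dict.empty

-- inner 'while p > 0 and word[idx] != diagram[p]' of KMP; p strictly decreases (table values satisfy d[k] ≤ k),
-- so fuel p.toNat + 1 is never exhausted on the calls A makes
def kmpWhile (table : PySem.Dict Int Int) (dia : List Char) (c : Char) : Nat → Int → Int
  | 0, p => p
  | fuel+1, p =>
    if 0 < p ∧ ¬ (some c = PySem.List.pyGet? dia p) then
      kmpWhile table dia c fuel (table.getD (p - 1) 0)
    else p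

-- 'for idx in range(len(word))' of KMP, over the (index, char) pairs, with state p and the results list
def kmpLoop (dia : List Char) (table : PySem.Dict Int Int) : List (Int × Char) → Int → List Int → List Int
  | [], _, res => res
  | (idx, c) :: rest, p, res =>
    let p1 := kmpWhile table dia c (p.toNat + 1) p
    if some c = PySem.List.pyGet? dia p1 then
      if p1 = (dia.length : Int) - 1 then
        kmpLoop dia table rest (table.getD p1 0) (res ++ [idx - (dia.length : Int) + 2])
      else
        kmpLoop dia table rest (p1 + 1) res
    else
      kmpLoop dia table rest p1 res

def KMP (word dia : List Char) : List Int :=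
  kmpLoop dia (table_func dia) (PySem.List.enumerate word 0) 0 []

-- loop body of solution; S[i-1] + S[i] is the two-char string built from the two lookups
-- (both indices are in range for i in range(1, len(S)), so the Option.toList appends are exact)
def solBody (w : List Char) (answer : Int) (i : Int) : Int :=
  let dia := (PySem.List.pyGet? w (i - 1)).toList ++ (PySem.List.pyGet? w i).toList
  let result := KMP w dia
  if result.length < 2 then max answer (-1)
  else max answer (PySem.List.pyGetD result (-1) 0 - PySem.List.pyGetD result 0 0)

def solution (S : String) : Int :=
  (PySem.List.pyRange 1 (PySem.Str.len S) 1).foldl (solBody S.toList) (-2)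

-- ===== PORT B =====
-- d[pr] = (d[pr][0] if pr in d else i, i)
def bUpd (d : PySem.Dict (Char × Char) (Int × Int)) (pr : Int × (Char × Char)) :
    PySem.Dict (Char × Char) (Int × Int) :=
  d.insert pr.2 ((match d.get? pr.2 with | some v => v.1 | none => pr.1), pr.1)

-- best = max(best, l - f if l > f else -1)
def bBest (best : Int) (fl : Int × Int) : Int :=
  max best (if fl.1 < fl.2 then fl.2 - fl.1 else -1)

def solution_alt (S : String) : Int :=
  let w := S.toList
  let d := (PySem.List.enumerate (w.zip w.tail) 0).foldl bUpd PySem.Dict.empty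
  d.values.foldl bBest (-2)

-- ===== PRECONDITION & SPEC =====
def Spec_solution (S : String) (out : Int) : Prop := out = solution_alt S
instance (S : String) (out : Int) : Decidable (Spec_solution S out) := by unfold Spec_solution; infer_instance

-- ===== CLAIM (what is proved, stated in full; the proofs are below) =====
def Claim_equal_solution : Prop := ∀ (S : String), Dom_solution S → Spec_solution S (solution S)

-- ===== LEMMAS AND PROOFS =====

-- indices (counted from s) at which the pair q occurs in the pair list z
def occA (q : Char × Char) (z : List (Char × Char)) (s : Int) : List Int :=
  ((PySem.List.enumerate z s).filter (fun p => decide (p.2 = q))).map (·.1)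

-- the value A's loop contributes for the pair q
def vA (z : List (Char × Char)) (q : Char × Char) : Int :=
  if (occA q z 0).length < 2 then -1 else (occA q z 0).getLastD 0 - (occA q z 0).headD 0

-- spec of A's KMP loop on a two-char pattern [a,b]: state p is 1 iff the previous char was a
def gSpec (a b : Char) : List Char → Int → Bool → List Int
  | [], _, _ => []
  | c :: r, i, pa => (if pa ∧ c = b then [i] else []) ++ gSpec a b r (i + 1) (decide (c = a))

lemma occA_nil (q : Char × Char) (s : Int) : occA q [] s = [] := rfl

lemma occA_cons (q x r s) : occA q (x :: r) s = (if x = q then [s] else []) ++ occA q r (s + 1) := by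
  simp [occA, PySem.List.enumerate_cons]
  split_ifs <;> simp_all

lemma occA_append (q : Char × Char) (z1 z2 : List (Char × Char)) (s : Int) :
    occA q (z1 ++ z2) s = occA q z1 s ++ occA q z2 (s + z1.length) := by
  simp [occA, PySem.List.enumerate_append]

lemma table_spec (a b : Char) :
    (table_func [a, b]).getD 0 0 = 0 ∧
    (table_func [a, b]).getD 1 0 = (if a = b then 1 else 0) := by
  by_cases h : b = a
  · subst h
    simp [table_func, tableLoop, PySem.List.pyGet?, PySem.List.pyIdx?, PySem.Dict.getD_insert]
  · have hab : a ≠ b := fun e => h e.symm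
    simp [table_func, tableLoop, PySem.List.pyGet?, PySem.List.pyIdx?, h, hab]

lemma kmp_step (a b c : Char) (idx : Int) (rest : List (Int × Char)) (pa : Bool) (res : List Int) :
    kmpLoop [a, b] (table_func [a, b]) ((idx, c) :: rest) (if pa then 1 else 0) res
      = kmpLoop [a, b] (table_func [a, b]) rest (if c = a then 1 else 0)
          (res ++ if pa ∧ c = b then [idx] else []) := by
  have hz : ∀ (ch : Char) (f : Nat), kmpWhile (table_func [a, b]) [a, b] ch f 0 = 0 := by
    intro ch f; cases f <;> simp [kmpWhile]
  have hg0 : PySem.List.pyGet? [a, b] (0 : Int) = some a := by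
    simp [PySem.List.pyGet?, PySem.List.pyIdx?]
  have hg1 : PySem.List.pyGet? [a, b] (1 : Int) = some b := by
    simp [PySem.List.pyGet?, PySem.List.pyIdx?]
  have h1 : ∀ (ch : Char), kmpWhile (table_func [a, b]) [a, b] ch 2 1
      = if ch = b then 1 else 0 := by
    intro ch
    by_cases hcb : ch = b
    · simp [kmpWhile, hg1, hcb]
    · simp [kmpWhile, hg1, hcb, (table_spec a b).1, hz]
  have harith : idx - (([a, b].length : Nat) : Int) + 2 = idx := by
    simp only [List.length_cons, List.length_nil]; push_cast; ring
  have hlen : (([a, b].length : Nat) : Int) - 1 = 1 := by norm_num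
  cases pa with
  | false =>
    by_cases hca : c = a
    · subst hca
      simp [kmpLoop, hz, hg0, hg1]
    · simp [kmpLoop, hz, hg0, hg1, hca]
  | true =>
    by_cases hcb : c = b
    · subst hcb
      simp [kmpLoop, hz, h1, hg0, hg1, hlen, harith]
      rw [(table_spec a c).2]
      by_cases hab : a = c
      · simp [hab]
      · have hba : ¬ c = a := fun e => hab e.symm
        simp [hab, hba]
    · by_cases hca : c = a
      · subst hca
        simp [kmpLoop, hz, h1, hg0, hg1, hcb, hlen]
      · simp [kmpLoop, hz, h1, hg0, hg1, hcb, hca]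

lemma kmp_g (a b : Char) : ∀ (l : List Char) (i : Int) (pa : Bool) (res : List Int),
    kmpLoop [a, b] (table_func [a, b]) (PySem.List.enumerate l i) (if pa then 1 else 0) res
      = res ++ gSpec a b l i pa := by
  intro l
  induction l with
  | nil => intro i pa res; simp [PySem.List.enumerate_nil, kmpLoop, gSpec]
  | cons c r ih =>
    intro i pa res
    rw [PySem.List.enumerate_cons, kmp_step]
    have hb : (if c = a then (1:Int) else 0) = if (decide (c = a)) then 1 else 0 := by simp
    rw [hb, ih (i + 1) (decide (c = a))]
    simp [gSpec]

lemma g_occ (a b : Char) : ∀ (l : List Char) (c0 : Char) (i : Int),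
    gSpec a b l i (decide (c0 = a)) = (occA (a, b) ((c0 :: l).zip l) (i - 1)).map (· + 1) := by
  intro l
  induction l with
  | nil => intro c0 i; simp [gSpec, occA]
  | cons c r ih =>
    intro c0 i
    rw [List.zip_cons_cons, occA_cons]
    have e : i - 1 + 1 = i + 1 - 1 := by ring
    rw [e, gSpec, ih c (i + 1), List.map_append]
    congr 1
    by_cases h0 : c0 = a <;> by_cases h1 : c = b <;>
      simp [h0, h1, Prod.ext_iff]

lemma KMP_eq (w : List Char) (a b : Char) :
    KMP w [a, b] = (occA (a, b) (w.zip w.tail) 0).map (· + 1) := by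
  cases w with
  | nil => simp [KMP, PySem.List.enumerate_nil, kmpLoop, occA]
  | cons c0 l =>
    have h := kmp_g a b (c0 :: l) 0 false []
    simp only [Bool.false_eq_true, if_false, List.nil_append] at h
    rw [KMP, h]
    rw [show gSpec a b (c0 :: l) 0 false = gSpec a b l 1 (decide (c0 = a)) from by simp [gSpec]]
    rw [g_occ a b l c0 1]
    norm_num

lemma occA_mem_ge (q z) : ∀ (s : Int), ∀ x ∈ occA q z s, s ≤ x := by
  induction z with
  | nil => intro s x hx; simp [occA] at hx
  | cons p r ih =>
    intro s x hx
    rw [occA_cons] at hx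
    rcases List.mem_append.1 hx with h | h
    · split_ifs at h <;> simp at h; omega
    · have := ih (s + 1) x h; omega

lemma occA_pairwise (q z) : ∀ (s : Int), (occA q z s).Pairwise (· < ·) := by
  induction z with
  | nil => intro s; simp [occA]
  | cons p r ih =>
    intro s
    rw [occA_cons, List.pairwise_append]
    refine ⟨?_, ?_, ?_⟩
    · split_ifs <;> simp
    · exact ih (s + 1)
    · intro x hx y hy
      split_ifs at hx <;> simp at hx
      have := occA_mem_ge q r (s + 1) y hy
      omega

lemma occA_ne_nil_iff (q z) : ∀ s, occA q z s ≠ [] ↔ q ∈ z := by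
  induction z with
  | nil => intro s; simp [occA]
  | cons p r ih =>
    intro s
    rw [occA_cons]
    by_cases h : p = q
    · simp [h]
    · have h' : ¬ q = p := fun e => h e.symm
      simp [h, h', ih (s + 1)]

lemma occA_head_lt_last (q : Char × Char) (z : List (Char × Char)) (s f0 : Int) (t : List Int)
    (h : occA q z s = f0 :: t) (ht : t ≠ []) : f0 < (f0 :: t).getLast (by simp) := by
  have hp := occA_pairwise q z s
  rw [h, List.pairwise_cons] at hp
  rw [List.getLast_cons ht]
  exact hp.1 _ (List.getLast_mem ht)

lemma solBody_eq (w : List Char) (m : Nat) (hm : m < (w.zip w.tail).length) (ans : Int) :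
    solBody w ans (1 + (m : Int)) = max ans (vA (w.zip w.tail) (w.zip w.tail)[m]) := by
  have hmw : m + 1 < w.length := by
    simp [List.length_zip, List.length_tail] at hm; omega
  have hmw0 : m < w.length := by omega
  have e1 : (1 + (m : Int)) - 1 = ((m : Nat) : Int) := by ring
  have e2 : (1 + (m : Int)) = (((m + 1 : Nat)) : Int) := by push_cast; ring
  have hq : (w.zip w.tail)[m] = (w[m]'hmw0, w[m+1]'hmw) := by
    rw [List.getElem_zip]
    congr 1
    exact List.getElem_tail _
  have hget1 : PySem.List.pyGet? w ((1 + (m : Int)) - 1) = some (w[m]'hmw0) := by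
    rw [e1, PySem.List.pyGet?_natCast]
    exact List.getElem?_eq_getElem hmw0
  have hget2 : PySem.List.pyGet? w (1 + (m : Int)) = some (w[m+1]'hmw) := by
    rw [e2, PySem.List.pyGet?_natCast]
    exact List.getElem?_eq_getElem hmw
  set a := w[m]'hmw0
  set b := w[m+1]'hmw
  set o := occA (a, b) (w.zip w.tail) 0 with ho
  have hk : KMP w ((PySem.List.pyGet? w ((1 + (m : Int)) - 1)).toList
      ++ (PySem.List.pyGet? w (1 + (m : Int))).toList) = o.map (· + 1) := by
    rw [hget1, hget2]
    exact KMP_eq w a b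
  show (if (KMP w _).length < 2 then max ans (-1)
    else max ans (PySem.List.pyGetD (KMP w _) (-1) 0 - PySem.List.pyGetD (KMP w _) 0 0))
      = max ans (vA (w.zip w.tail) (w.zip w.tail)[m])
  rw [hk, hq, vA, ← ho]
  clear_value o
  simp only [List.length_map]
  by_cases hl : o.length < 2
  · simp [hl]
  · rw [if_neg hl, if_neg hl]
    have hne : o ≠ [] := by intro e; rw [e] at hl; simp at hl
    have hne' : o.map (· + 1) ≠ [] := by simpa using hne
    rw [PySem.List.pyGetD_neg_one _ 0 hne']
    have hlast : (o.map (· + 1)).getLast hne' = o.getLast hne + 1 := List.getLast_map _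
    rw [hlast]
    have hlD : o.getLastD 0 = o.getLast hne := by
      rw [List.getLastD_eq_getLast?, List.getLast?_eq_some_getLast hne]; rfl
    rw [hlD]
    obtain ⟨x, t, rfl⟩ : ∃ x t, o = x :: t := by
      cases o with
      | nil => exact absurd rfl hne
      | cons x t => exact ⟨x, t, rfl⟩
    rw [show ((x :: t).map (· + 1)) = (x + 1) :: t.map (· + 1) from by simp]
    rw [PySem.List.pyGetD_zero_cons]
    simp only [List.headD]
    ring_nf

lemma fold_range (w : List Char) : ∀ (m : Nat), m ≤ (w.zip w.tail).length → ∀ ans,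
    (PySem.List.pyRange 1 (1 + (m : Int)) 1).foldl (solBody w) ans
      = ((w.zip w.tail).take m).foldl (fun a q => max a (vA (w.zip w.tail) q)) ans := by
  intro m
  induction m with
  | zero => intro _ ans; simp [PySem.List.pyRange_one_eq_nil (by norm_num : (1:Int) ≤ 1)]
  | succ k ih =>
    intro hk ans
    have e : 1 + ((k + 1 : Nat) : Int) = (1 + (k : Nat)) + 1 := by push_cast; ring
    rw [e, PySem.List.pyRange_one_succ_right (by omega), List.foldl_append, ih (by omega) ans]
    have ht : (w.zip w.tail).take (k + 1)
        = (w.zip w.tail).take k ++ [(w.zip w.tail)[k]'(by omega)] := by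
      rw [List.take_succ, List.getElem?_eq_getElem (by omega)]
      rfl
    rw [ht, List.foldl_append]
    simp only [List.foldl_cons, List.foldl_nil]
    exact solBody_eq w k (by omega) _

lemma solution_eq_foldZ (S : String) :
    solution S = (S.toList.zip S.toList.tail).foldl
      (fun a q => max a (vA (S.toList.zip S.toList.tail) q)) (-2) := by
  set w := S.toList with hw
  set z := w.zip w.tail with hz
  rw [solution]
  rcases Nat.eq_zero_or_pos w.length with h0 | hpos
  · have hw0 : w = [] := List.eq_nil_of_length_eq_zero h0
    have hlen : PySem.Str.len S = 0 := by
      rw [PySem.Str.len_eq, ← hw, hw0]; rfl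
    rw [hlen, show z = [] from by rw [hz, hw0]; rfl]
    simp [PySem.List.pyRange_one_eq_nil (by norm_num : (0:Int) ≤ 1)]
  · have hzl : z.length = w.length - 1 := by
      rw [hz]; simp [List.length_zip, List.length_tail]
    have hlen : PySem.Str.len S = 1 + (z.length : Int) := by
      rw [PySem.Str.len_eq, ← hw, hzl]; omega
    rw [hlen]
    have := fold_range w z.length (by rw [hz]) (-2)
    rw [hz] at this ⊢
    rw [this, List.take_length]

lemma bDict_get? (z : List (Char × Char)) (q : Char × Char) :
    ((PySem.List.enumerate z 0).foldl bUpd PySem.Dict.empty).get? q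
      = (occA q z 0).head?.map (fun f => (f, (occA q z 0).getLastD f)) := by
  induction z using List.reverseRecOn with
  | nil => simp [PySem.List.enumerate_nil, occA, PySem.Dict.get?_empty]
  | append_singleton z x ih =>
    rw [PySem.List.enumerate_append, List.foldl_append]
    simp only [PySem.List.enumerate_cons, PySem.List.enumerate_nil, List.foldl_cons, List.foldl_nil]
    rw [occA_append]
    by_cases hqx : q = x
    · subst hqx
      rw [bUpd]
      simp only [PySem.Dict.get?_insert_self, ih]
      cases ho : occA q z 0 with
      | nil => simp [ho, occA_cons, occA_nil]
      | cons f0 t =>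
        simp [ho, occA_cons, occA_nil, List.getLastD_eq_getLast?]
        rw [show (f0 :: (t ++ [(z.length : Int)])) = (f0 :: t) ++ [(z.length : Int)] from by simp,
          List.getLast?_concat]
        rfl
    · rw [bUpd]
      simp only [PySem.Dict.get?_insert, if_neg hqx, ih]
      have hx : ¬ (x = q) := fun e => hqx e.symm
      simp [occA_cons, occA_nil, hx]

lemma bKeys (z : List (Char × Char)) :
    ((PySem.List.enumerate z 0).foldl bUpd PySem.Dict.empty).keys = PySem.Set.ofList z := by
  have h := PySem.Dict.keys_foldl_insert_key (PySem.List.enumerate z 0) (fun pr => pr.2)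
    (fun d pr => ((match d.get? pr.2 with | some v => v.1 | none => pr.1), pr.1)) PySem.Dict.empty
  simp only [PySem.List.map_snd_enumerate] at h
  exact h

lemma bKeys_nodup (z : List (Char × Char)) :
    ((PySem.List.enumerate z 0).foldl bUpd PySem.Dict.empty).keys.Nodup :=
  PySem.Dict.nodup_keys_foldl_insert_key (PySem.List.enumerate z 0) (fun pr => pr.2)
    (fun d pr => ((match d.get? pr.2 with | some v => v.1 | none => pr.1), pr.1)) PySem.Dict.empty
    PySem.Dict.nodup_keys_empty

lemma solution_alt_eq_foldKeys (S : String) :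
    solution_alt S = (PySem.Set.ofList (S.toList.zip S.toList.tail)).foldl
      (fun a q => max a (vA (S.toList.zip S.toList.tail) q)) (-2) := by
  set z := S.toList.zip S.toList.tail with hz
  show ((PySem.List.enumerate z 0).foldl bUpd PySem.Dict.empty).values.foldl bBest (-2) = _
  rw [PySem.Dict.values_eq_map_keys _ (bKeys_nodup z) ((0 : Int), (0 : Int))]
  rw [List.foldl_map, bKeys]
  apply PySem.List.foldl_congr_mem
  intro acc q hq
  have hqz : q ∈ z := (PySem.Set.mem_ofList z q).1 hq
  have hocc : occA q z 0 ≠ [] := (occA_ne_nil_iff q z 0).2 hqz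
  obtain ⟨f0, t, ho⟩ : ∃ f0 t, occA q z 0 = f0 :: t := by
    cases hoc : occA q z 0 with
    | nil => exact absurd hoc hocc
    | cons f0 t => exact ⟨f0, t, rfl⟩
  have hget : ((PySem.List.enumerate z 0).foldl bUpd PySem.Dict.empty).getD q ((0 : Int), (0 : Int))
      = (f0, (f0 :: t).getLastD f0) := by
    rw [PySem.Dict.getD_eq_get?_getD, bDict_get? z q, ho]
    rfl
  rw [hget, bBest, vA, ho]
  cases t with
  | nil => simp
  | cons y t' =>
    have htne : (y :: t') ≠ [] := by simp
    have hlast : (f0 :: y :: t').getLastD f0 = (f0 :: y :: t').getLast (by simp) := by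
      rw [List.getLastD_eq_getLast?, List.getLast?_eq_some_getLast (by simp)]; rfl
    have hlast0 : (f0 :: y :: t').getLastD 0 = (f0 :: y :: t').getLast (by simp) := by
      rw [List.getLastD_eq_getLast?, List.getLast?_eq_some_getLast (by simp)]; rfl
    have hlt : f0 < (f0 :: y :: t').getLast (by simp) := occA_head_lt_last q z 0 f0 (y :: t') ho htne
    simp only [hlast, hlast0]
    rw [if_pos hlt]
    simp [List.headD]

lemma foldl_max_le {α : Type} (f : α → Int) (c : Int) :
    ∀ (l : List α) (init : Int), init ≤ c → (∀ x ∈ l, f x ≤ c) →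
      l.foldl (fun a x => max a (f x)) init ≤ c := by
  intro l
  induction l with
  | nil => intro init h _; simpa using h
  | cons x r ih =>
    intro init h hall
    simp only [List.foldl_cons]
    exact ih _ (max_le h (hall x (by simp))) (fun y hy => hall y (by simp [hy]))

lemma foldl_max_mem_iff {α : Type} (f : α → Int) (l₁ l₂ : List α) (init : Int)
    (h : ∀ x, x ∈ l₁ ↔ x ∈ l₂) :
    l₁.foldl (fun a x => max a (f x)) init = l₂.foldl (fun a x => max a (f x)) init := by
  have h1 := PySem.List.le_foldl_max_int l₁ f init
  have h2 := PySem.List.le_foldl_max_int l₂ f init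
  exact le_antisymm
    (foldl_max_le f _ l₁ init h2.1 (fun x hx => h2.2 x ((h x).1 hx)))
    (foldl_max_le f _ l₂ init h1.1 (fun x hx => h1.2 x ((h x).2 hx)))

-- ===== VERDICT (by name: the statement is the Claim_ definition above) =====
theorem solution_spec : Claim_equal_solution := by
  intro S _
  show solution S = solution_alt S
  rw [solution_eq_foldZ, solution_alt_eq_foldKeys]
  exact foldl_max_mem_iff _ _ _ _ (fun x => by simp [PySem.Set.mem_ofList])
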